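-- pv_equiv track=rewrite | github.com/urospetraskovic/ObrazovniSoftProjekat | Project/front/backend/quiz_generator.py | _find_correct_index
-- ===== SOURCE A (Python) =====
-- from typing import Dict, List, Any
--
-- def _find_correct_index(options: List[str], correct_answer: str) -> int:
--     """Find the index of the correct answer in options list"""
--     if not options or not correct_answer:
--         return 0
--
--     # Try exact match first
--     for i, opt in enumerate(options):
--         if opt == correct_answer:
--             return i
--
--     # Try matching by letter prefix
--     correct_letter = correct_answer[0].upper() if correct_answer else 'A'
--     for i, opt in enumerate(options):
--         if opt.startswith(correct_letter):
--             return i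
--
--     return 0
-- ===== SOURCE B (Python) =====
-- def _find_correct_index(options, correct_answer):
--     """Single pass: exact match returns immediately; first letter-prefix match is kept as fallback."""
--     if not options or not correct_answer:
--         return 0
--     correct_letter = correct_answer[0].upper()
--     fallback = None
--     for i, opt in enumerate(options):
--         if opt == correct_answer:
--             return i
--         if fallback is None and opt.startswith(correct_letter):
--             fallback = i
--     return fallback if fallback is not None else 0
-- ===== Notes on version B (the rewrite author's own statement) =====
-- stated objective: simpler
-- what changed: Collapses A's two full scans into one enumerate loop that returns on an exact match and records the first letter-prefix match as a fallback returned after the scan.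
import Mathlib
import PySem

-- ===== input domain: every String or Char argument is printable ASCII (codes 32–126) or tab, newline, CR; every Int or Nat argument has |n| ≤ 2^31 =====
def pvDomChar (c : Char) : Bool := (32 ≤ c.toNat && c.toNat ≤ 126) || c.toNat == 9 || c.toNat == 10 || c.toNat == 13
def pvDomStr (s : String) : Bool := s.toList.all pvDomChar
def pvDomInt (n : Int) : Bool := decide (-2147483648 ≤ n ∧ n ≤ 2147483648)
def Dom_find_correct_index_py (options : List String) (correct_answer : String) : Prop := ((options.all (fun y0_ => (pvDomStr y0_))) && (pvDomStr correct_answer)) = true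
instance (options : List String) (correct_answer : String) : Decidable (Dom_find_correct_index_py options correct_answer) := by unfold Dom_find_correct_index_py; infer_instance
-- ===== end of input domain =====

-- B collapses A's two full scans into one loop (exact match returns, first prefix match kept as fallback); equivalence proved on all inputs.

-- ===== PORT A =====
-- first loop: exact match
def aLoopEq : List String → String → Int → Option Int
  | [], _, _ => none
  | o :: rest, ca, i => if o = ca then some i else aLoopEq rest ca (i + 1)

-- second loop: letter-prefix match
def aLoopPre : List String → String → Int → Option Int
  | [], _, _ => none
  | o :: rest, letter, i =>
      if PySem.Str.startswith o letter then some i else aLoopPre rest letter (i + 1)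

def find_correct_index_py (options : List String) (correct_answer : String) : Int :=
  if options = [] ∨ correct_answer = "" then 0
  else
    match aLoopEq options correct_answer 0 with
    | some i => i
    | none =>
      -- correct_answer[0].upper() if correct_answer else 'A' (the inner 'none' is unreachable)
      let correct_letter : String :=
        if correct_answer ≠ "" then
          match PySem.Str.pyGet? correct_answer 0 with
          | some c => String.singleton (PySem.Chars.upperChar c)
          | none => "A"
        else "A"
      match aLoopPre options correct_letter 0 with
      | some i => i
      | none => 0

-- ===== PORT B =====
-- single pass carrying the index and the fallback
def bLoop : List String → String → String → Int → Option Int → Int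
  | [], _, _, _, fb => fb.getD 0
  | o :: rest, ca, letter, i, fb =>
      if o = ca then i
      else bLoop rest ca letter (i + 1)
             (if fb.isNone && PySem.Str.startswith o letter then some i else fb)

def find_correct_index_py_alt (options : List String) (correct_answer : String) : Int :=
  if options = [] ∨ correct_answer = "" then 0
  else
    let correct_letter : String :=
      match PySem.Str.pyGet? correct_answer 0 with
      | some c => String.singleton (PySem.Chars.upperChar c)
      | none => "A"
    bLoop options correct_answer correct_letter 0 none

-- ===== PRECONDITION & SPEC =====
def Spec_find_correct_index_py (options : List String) (correct_answer : String) (out : Int) : Prop := out = find_correct_index_py_alt options correct_answer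
instance (options : List String) (correct_answer : String) (out : Int) : Decidable (Spec_find_correct_index_py options correct_answer out) := by unfold Spec_find_correct_index_py; infer_instance

-- ===== CLAIM (what is proved, stated in full; the proofs are below) =====
def Claim_equal_find_correct_index_py : Prop := ∀ (options : List String) (correct_answer : String), Dom_find_correct_index_py options correct_answer → Spec_find_correct_index_py options correct_answer (find_correct_index_py options correct_answer)

-- ===== LEMMAS AND PROOFS =====

-- the one-pass loop equals the two-scan composition
theorem bLoop_eq (opts : List String) (ca letter : String) (i : Int) (fb : Option Int) :
    bLoop opts ca letter i fb =
      match aLoopEq opts ca i with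
      | some j => j
      | none => fb.getD ((aLoopPre opts letter i).getD 0) := by
  induction opts generalizing i fb with
  | nil => simp [bLoop, aLoopEq, aLoopPre]
  | cons o rest ih =>
      simp only [bLoop, aLoopEq, aLoopPre]
      by_cases he : o = ca
      · simp [he]
      · simp only [he, if_false]
        rw [ih]
        cases fb with
        | some f => simp
        | none =>
            by_cases hs : PySem.Chars.startswith o.toList letter.toList <;> simp [hs]

theorem find_correct_index_py_spec : Claim_equal_find_correct_index_py := by
  intro options correct_answer _
  unfold Spec_find_correct_index_py find_correct_index_py find_correct_index_py_alt
  by_cases hg : options = [] ∨ correct_answer = ""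
  · simp [hg]
  · simp only [hg, if_false]
    have hca : correct_answer ≠ "" := by
      intro h; exact hg (Or.inr h)
    rw [bLoop_eq]
    simp only [hca, ne_eq, not_false_iff, if_true]
    cases aLoopEq options correct_answer 0 with
    | some j => rfl
    | none =>
        cases aLoopPre options
            (match PySem.Str.pyGet? correct_answer 0 with
             | some c => String.singleton (PySem.Chars.upperChar c)
             | none => "A") 0 with
        | some j => rfl
        | none => rfl

-- ===== VERDICT (by name: the statement is the Claim_ definition above) =====
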